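-- pv_equiv track=rewrite | github.com/Artheau/SpriteSomething | merge_detection.py | ratio_test
-- ===== SOURCE A (Python) =====
-- from itertools import chain
--
-- def ratio_test(master_location_dict,tile1,tile2):
--     for location in chain(master_location_dict[tile1],master_location_dict[tile2]):
--         if location not in master_location_dict[tile1] or location not in master_location_dict[tile2]:
--             return False
--         #conceivably there is a way later to do things like 2 of this tile for every 1 of another,
--         # but this is outside the scope of the present push
--         if len(master_location_dict[tile1][location]) != len(master_location_dict[tile2][location]):
--             return False
--         else:
--             pass   #continue checking the other poses
--     else:
--         return True
-- ===== SOURCE B (Python) =====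
-- def ratio_test(master_location_dict, tile1, tile2):
--     def signature(tile):
--         d = master_location_dict[tile]
--         return [(k, len(d[k])) for k in sorted(d)]
--     return signature(tile1) == signature(tile2)
-- ===== Notes on version B (the rewrite author's own statement) =====
-- stated objective: alternative
-- what changed: A's interleaved loop over the chained keys (per-key membership test plus length test with early return) is replaced by computing a canonical signature for each tile -- the sorted key list paired with each key's pose count -- and comparing the two signatures for equality.
import Mathlib
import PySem

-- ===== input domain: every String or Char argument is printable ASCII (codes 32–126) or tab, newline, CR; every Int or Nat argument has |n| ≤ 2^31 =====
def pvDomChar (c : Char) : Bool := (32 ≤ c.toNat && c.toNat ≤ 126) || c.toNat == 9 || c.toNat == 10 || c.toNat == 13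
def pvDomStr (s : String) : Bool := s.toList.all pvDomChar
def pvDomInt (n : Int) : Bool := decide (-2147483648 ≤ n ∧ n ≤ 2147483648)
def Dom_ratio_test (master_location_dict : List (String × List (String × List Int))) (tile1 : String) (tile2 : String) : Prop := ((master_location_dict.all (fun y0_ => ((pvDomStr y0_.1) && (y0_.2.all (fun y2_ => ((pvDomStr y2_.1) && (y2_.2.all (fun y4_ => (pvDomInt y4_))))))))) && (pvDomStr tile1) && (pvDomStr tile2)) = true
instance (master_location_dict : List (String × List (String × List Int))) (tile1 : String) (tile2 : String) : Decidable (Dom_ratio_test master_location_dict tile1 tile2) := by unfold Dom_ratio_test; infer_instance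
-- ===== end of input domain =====

-- B replaces A's interleaved membership-and-length loop by comparing canonical signatures: sorted key list paired with pose counts.


-- ===== PORT A =====
-- dict-of-dicts construction (Python builds the nested dicts before the function runs)
def pvOuterA (master_location_dict : List (String × List (String × List Int))) :
    PySem.Dict String (PySem.Dict String (List Int)) :=
  PySem.Dict.ofList (master_location_dict.map (fun p => (p.1, PySem.Dict.ofList p.2)))

-- the for-loop over chain(d1, d2) with its two early returns
def pvLoopA (d1 d2 : PySem.Dict String (List Int)) : List String → Bool
  | [] => true
  | loc :: rest =>
    if !(d1.contains loc) || !(d2.contains loc) then false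
    else if (d1.getD loc []).length != (d2.getD loc []).length then false
    else pvLoopA d1 d2 rest

def ratio_test (master_location_dict : List (String × List (String × List Int))) (tile1 : String) (tile2 : String) : Bool :=
  match (pvOuterA master_location_dict).get? tile1, (pvOuterA master_location_dict).get? tile2 with
  | some d1, some d2 => pvLoopA d1 d2 (d1.keys ++ d2.keys)
  | _, _ => false  -- unreachable under Pre_ (Python raises KeyError)

-- ===== PORT B =====
-- same dict-of-dicts construction, B's own copy
def pvOuterB (master_location_dict : List (String × List (String × List Int))) :
    PySem.Dict String (PySem.Dict String (List Int)) :=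
  PySem.Dict.ofList (master_location_dict.map (fun p => (p.1, PySem.Dict.ofList p.2)))

-- signature(tile): [(k, len(d[k])) for k in sorted(d)]
def pvSignature (d : PySem.Dict String (List Int)) : List (String × Int) :=
  (PySem.List.sorted d.keys (fun k => k) false).map (fun k => (k, ((d.getD k []).length : Int)))

def ratio_test_alt (master_location_dict : List (String × List (String × List Int))) (tile1 : String) (tile2 : String) : Bool :=
  match (pvOuterB master_location_dict).get? tile1 with
  | none => false  -- unreachable under Pre_ (Python raises KeyError)
  | some d1 =>
    match (pvOuterB master_location_dict).get? tile2 with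
    | none => false  -- unreachable under Pre_ (Python raises KeyError)
    | some d2 => pvSignature d1 == pvSignature d2

-- ===== PRECONDITION & SPEC =====
-- Pre_ excludes exactly the inputs where master_location_dict[tile1] or [tile2] raises KeyError in Python
def Pre_ratio_test (master_location_dict : List (String × List (String × List Int))) (tile1 : String) (tile2 : String) : Prop :=
  tile1 ∈ master_location_dict.map Prod.fst ∧ tile2 ∈ master_location_dict.map Prod.fst
instance (master_location_dict : List (String × List (String × List Int))) (tile1 : String) (tile2 : String) : Decidable (Pre_ratio_test master_location_dict tile1 tile2) := by unfold Pre_ratio_test; infer_instance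

def pvWitness_ratio_test : (List (String × List (String × List Int))) × String × String :=
  ([("a", [("x", [1, 2])]), ("b", [("x", [3, 4])])], "a", "b")

def Spec_ratio_test (master_location_dict : List (String × List (String × List Int))) (tile1 : String) (tile2 : String) (out : Bool) : Prop := out = ratio_test_alt master_location_dict tile1 tile2
instance (master_location_dict : List (String × List (String × List Int))) (tile1 : String) (tile2 : String) (out : Bool) : Decidable (Spec_ratio_test master_location_dict tile1 tile2 out) := by unfold Spec_ratio_test; infer_instance

-- ===== CLAIM (what is proved, stated in full; the proofs are below) =====
def Claim_equal_ratio_test : Prop := ∀ (master_location_dict : List (String × List (String × List Int))) (tile1 : String) (tile2 : String), Dom_ratio_test master_location_dict tile1 tile2 → Pre_ratio_test master_location_dict tile1 tile2 → Spec_ratio_test master_location_dict tile1 tile2 (ratio_test master_location_dict tile1 tile2)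

-- ===== LEMMAS AND PROOFS =====

-- A's loop is an 'all' over the traversed key list
theorem pvLoopA_eq_all (d1 d2 : PySem.Dict String (List Int)) (l : List String) :
    pvLoopA d1 d2 l =
      l.all (fun loc => (d1.contains loc && d2.contains loc) &&
        ((d1.getD loc []).length == (d2.getD loc []).length)) := by
  induction l with
  | nil => rfl
  | cons loc rest ih =>
    simp only [pvLoopA, List.all_cons, ih]
    by_cases h1 : d1.contains loc = true
    · by_cases h2 : d2.contains loc = true
      · by_cases h3 : (d1.getD loc []).length = (d2.getD loc []).length
        · simp [h1, h2, h3]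
        · simp [h1, h2, h3]
      · simp [h1, h2]
    · simp [h1]

-- any value stored in a dict built by a foldl of inserts comes from the list or from the start dict
theorem pvGet?_foldl_insert {κ ν : Type} [BEq κ] [LawfulBEq κ]
    (l : List (κ × ν)) (d : PySem.Dict κ ν) (k : κ) (v : ν)
    (h : (l.foldl (fun d p => d.insert p.1 p.2) d).get? k = some v) :
    v ∈ l.map Prod.snd ∨ d.get? k = some v := by
  induction l generalizing d with
  | nil => exact Or.inr h
  | cons p rest ih =>
    simp only [List.foldl_cons] at h
    rcases ih _ h with hmem | hget
    · exact Or.inl (by simp [hmem])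
    · by_cases hk : k = p.1
      · subst hk
        rw [PySem.Dict.get?_insert_self] at hget
        exact Or.inl (by simp [← Option.some_inj.mp hget])
      · rw [PySem.Dict.get?_insert_of_ne _ _ hk] at hget
        exact Or.inr hget

-- every inner dict reachable from pvOuterA has Nodup keys
theorem pvInner_nodup (m : List (String × List (String × List Int))) (t : String)
    (d : PySem.Dict String (List Int)) (h : (pvOuterA m).get? t = some d) :
    d.keys.Nodup := by
  have h' : ((m.map (fun p => (p.1, PySem.Dict.ofList p.2))).foldl
      (fun d p => d.insert p.1 p.2) PySem.Dict.empty).get? t = some d := h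
  have := pvGet?_foldl_insert (m.map (fun p => (p.1, PySem.Dict.ofList p.2))) PySem.Dict.empty t d h'
  rcases this with hmem | hget
  · simp only [List.map_map, List.mem_map] at hmem
    obtain ⟨p, -, hp⟩ := hmem
    rw [← hp]
    exact PySem.Dict.nodup_keys_ofList p.2
  · simp [PySem.Dict.get?_empty] at hget

-- signature equality characterises key-set equality plus per-key pose-count equality
theorem pvSignature_eq_iff (d1 d2 : PySem.Dict String (List Int))
    (h1 : d1.keys.Nodup) (h2 : d2.keys.Nodup) :
    pvSignature d1 = pvSignature d2 ↔
      ((∀ x, x ∈ d1.keys ↔ x ∈ d2.keys) ∧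
       ∀ k ∈ d1.keys, (d1.getD k []).length = (d2.getD k []).length) := by
  unfold pvSignature
  constructor
  · intro h
    have hfst : PySem.List.sorted d1.keys (fun k => k) false
        = PySem.List.sorted d2.keys (fun k => k) false := by
      have := congrArg (List.map Prod.fst) h
      simpa [List.map_map, Function.comp_def] using this
    have hperm : d1.keys.Perm d2.keys :=
      (PySem.List.sorted_id_eq_sorted_id_iff_perm _ _).mp hfst
    refine ⟨fun x => hperm.mem_iff, ?_⟩
    intro k hk
    rw [hfst] at h
    have := (List.map_eq_map_iff).mp h k
      (by rw [PySem.List.mem_sorted]; exact hperm.mem_iff.mp hk)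
    have := congrArg Prod.snd this
    simpa using this
  · rintro ⟨hmem, hlen⟩
    have hperm : d1.keys.Perm d2.keys :=
      (List.perm_ext_iff_of_nodup h1 h2).mpr hmem
    have hfst : PySem.List.sorted d1.keys (fun k => k) false
        = PySem.List.sorted d2.keys (fun k => k) false :=
      PySem.List.sorted_eq_sorted_of_perm _ _ _ (fun a b hab => hab) hperm
    rw [hfst]
    apply (List.map_eq_map_iff).mpr
    intro k hk
    rw [PySem.List.mem_sorted] at hk
    have := hlen k (hmem k |>.mpr hk)
    simp [this]

-- the interleaved pass over d1.keys ++ d2.keys equals the signature comparison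
theorem pvMain (d1 d2 : PySem.Dict String (List Int))
    (h1 : d1.keys.Nodup) (h2 : d2.keys.Nodup) :
    pvLoopA d1 d2 (d1.keys ++ d2.keys) = (pvSignature d1 == pvSignature d2) := by
  rw [pvLoopA_eq_all, Bool.eq_iff_iff, beq_iff_eq, pvSignature_eq_iff d1 d2 h1 h2]
  simp only [List.all_append, Bool.and_eq_true, List.all_eq_true,
    PySem.Dict.contains_iff_mem_keys, beq_iff_eq]
  constructor
  · rintro ⟨ha, hb⟩
    exact ⟨fun x => ⟨fun hx => (ha x hx).1.2, fun hx => (hb x hx).1.1⟩,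
      fun k hk => (ha k hk).2⟩
  · rintro ⟨hmem, hlen⟩
    exact ⟨fun k hk => ⟨⟨hk, (hmem k).mp hk⟩, hlen k hk⟩,
      fun k hk => ⟨⟨(hmem k).mpr hk, hk⟩, hlen k ((hmem k).mpr hk)⟩⟩

theorem pvOuterA_eq_B (m : List (String × List (String × List Int))) : pvOuterA m = pvOuterB m := rfl

-- ===== VERDICT (by name: the statement is the Claim_ definition above) =====
theorem ratio_test_spec : Claim_equal_ratio_test := by
  intro m t1 t2 _ _
  unfold Spec_ratio_test ratio_test ratio_test_alt
  rw [← pvOuterA_eq_B]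
  cases h1 : (pvOuterA m).get? t1 <;> cases h2 : (pvOuterA m).get? t2 <;> simp
  exact pvMain _ _ (pvInner_nodup m t1 _ h1) (pvInner_nodup m t2 _ h2)
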